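-- pv_equiv track=rewrite | github.com/PeshinaA/solving_statistical_games | go_easy.py | easer
-- ===== SOURCE A (Python) =====
-- def easer(first,second,m,par,lines_to_delete,fir,sec):  #сравнение 2х строк
--     list_true = []
--     reference_list = []
--     reference2_list = []
--     for i in range(m): #cоздаём эталонный список итога сравнения состоящий либо из 0, либо из 1
--         reference_list.append(0)
--         reference2_list.append(1)
--     for i in range(m):
--         if first[i] > second[i]: #ОН ДОБАВЛЯЕТСЯ 2 РАЗА ЕСЛИ ТУТ = -> решили проблему измением размера эталонного списка
--             list_true.append(0)
--         if first[i] < second[i]: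
--             list_true.append(1)
--         if first[i] == second[i]:
--             reference_list.pop(0)
--             reference2_list.pop(0)
--     if list_true == reference_list:
--         if par == "max":
--             lines_to_delete.append(sec)
--         if par == "min":
--             lines_to_delete.append(fir)
--     if list_true == reference2_list:
--         if par == "max":
--             lines_to_delete.append(fir)
--         if par == "min":
--             lines_to_delete.append(sec)
--     list_true = []
--     return lines_to_delete #лист с номерами строк, которые можно удалить, но они повторяются
-- ===== SOURCE B (Python) =====
-- def easer(first, second, m, par, lines_to_delete, fir, sec):
--     # Dominance checked with two boolean all() passes; no reference lists, no pops.
--     dom_ge = all(first[i] >= second[i] for i in range(m))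
--     dom_le = all(first[i] <= second[i] for i in range(m))
--     if dom_ge:
--         if par == "max":
--             lines_to_delete.append(sec)
--         elif par == "min":
--             lines_to_delete.append(fir)
--     if dom_le:
--         if par == "max":
--             lines_to_delete.append(fir)
--         elif par == "min":
--             lines_to_delete.append(sec)
--     return lines_to_delete
-- ===== Notes on version B (the rewrite author's own statement) =====
-- stated objective: simpler
-- what changed: Replaces the reference lists built and popped per equal element and the list_true accumulator with two direct boolean all() dominance checks (first>=second everywhere / first<=second everywhere); the double-append on fully equal sequences is preserved because both checks hold.
import Mathlib
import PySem

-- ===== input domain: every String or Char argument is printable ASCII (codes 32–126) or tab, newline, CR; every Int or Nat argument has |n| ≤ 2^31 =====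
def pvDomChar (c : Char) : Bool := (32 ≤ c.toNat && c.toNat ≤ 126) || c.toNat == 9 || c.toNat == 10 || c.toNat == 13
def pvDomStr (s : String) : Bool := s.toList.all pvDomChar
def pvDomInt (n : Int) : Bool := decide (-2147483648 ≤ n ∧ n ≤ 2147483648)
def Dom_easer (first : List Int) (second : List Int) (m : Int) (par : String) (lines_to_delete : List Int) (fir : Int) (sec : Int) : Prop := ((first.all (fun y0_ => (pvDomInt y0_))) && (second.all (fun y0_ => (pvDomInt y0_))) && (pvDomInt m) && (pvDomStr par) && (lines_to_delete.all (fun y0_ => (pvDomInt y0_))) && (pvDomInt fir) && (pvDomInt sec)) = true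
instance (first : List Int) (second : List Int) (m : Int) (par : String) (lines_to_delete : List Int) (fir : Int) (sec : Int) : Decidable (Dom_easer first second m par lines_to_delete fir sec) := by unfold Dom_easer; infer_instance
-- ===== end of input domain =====

-- B replaces A's reference lists (built, then popped per equal element) and the list_true
-- accumulator with two direct all-quantified dominance checks; same return value, and both
-- append to lines_to_delete in place exactly as A does.


-- ===== PORT A =====
-- transliteration of Source A: reference lists built by the first loop; the second loop appends to
-- list_true and pops (pop(0) = tail; the popped list is nonempty whenever Python does not raise,
-- and on the empty list Python raises — excluded by Pre_); first[i]/second[i] via pyGetD (in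
-- range under Pre_).
def easer (first : List Int) (second : List Int) (m : Int) (par : String) (lines_to_delete : List Int) (fir : Int) (sec : Int) : List Int :=
  let reference_list := (PySem.List.pyRange 0 m 1).foldl (fun acc _ => acc ++ [(0 : Int)]) []
  let reference2_list := (PySem.List.pyRange 0 m 1).foldl (fun acc _ => acc ++ [(1 : Int)]) []
  let st := (PySem.List.pyRange 0 m 1).foldl
    (fun (st : List Int × List Int × List Int) i =>
      let a := PySem.List.pyGetD first i 0
      let b := PySem.List.pyGetD second i 0
      let lt := if a > b then st.1 ++ [(0 : Int)] else st.1
      let lt := if a < b then lt ++ [(1 : Int)] else lt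
      if a = b then (lt, st.2.1.tail, st.2.2.tail) else (lt, st.2.1, st.2.2))
    ([], reference_list, reference2_list)
  let lines_to_delete :=
    if st.1 = st.2.1 then
      let t := if par = "max" then lines_to_delete ++ [sec] else lines_to_delete
      if par = "min" then t ++ [fir] else t
    else lines_to_delete
  if st.1 = st.2.2 then
    let t := if par = "max" then lines_to_delete ++ [fir] else lines_to_delete
    if par = "min" then t ++ [sec] else t
  else lines_to_delete

-- ===== PORT B =====
def easer_alt (first : List Int) (second : List Int) (m : Int) (par : String) (lines_to_delete : List Int) (fir : Int) (sec : Int) : List Int :=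
  let dom_ge := (PySem.List.pyRange 0 m 1).all
    (fun i => PySem.List.pyGetD second i 0 ≤ PySem.List.pyGetD first i 0)
  let dom_le := (PySem.List.pyRange 0 m 1).all
    (fun i => PySem.List.pyGetD first i 0 ≤ PySem.List.pyGetD second i 0)
  let lines_to_delete :=
    if dom_ge then
      if par = "max" then lines_to_delete ++ [sec]
      else if par = "min" then lines_to_delete ++ [fir]
      else lines_to_delete
    else lines_to_delete
  if dom_le then
    if par = "max" then lines_to_delete ++ [fir]
    else if par = "min" then lines_to_delete ++ [sec]
    else lines_to_delete
  else lines_to_delete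

-- ===== PRECONDITION & SPEC =====
-- Pre_ excludes exactly the inputs where Python A raises IndexError (first[i]/second[i] with
-- 0 < m beyond a list's length); for m ≤ 0 no index is touched and A returns.
def Pre_easer (first : List Int) (second : List Int) (m : Int) (par : String) (lines_to_delete : List Int) (fir : Int) (sec : Int) : Prop :=
  m ≤ 0 ∨ (m ≤ (first.length : Int) ∧ m ≤ (second.length : Int))
instance (first : List Int) (second : List Int) (m : Int) (par : String) (lines_to_delete : List Int) (fir : Int) (sec : Int) : Decidable (Pre_easer first second m par lines_to_delete fir sec) := by unfold Pre_easer; infer_instance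
def pvWitness_easer : List Int × List Int × Int × String × List Int × Int × Int := ([3, 1], [2, 1], 2, "max", [5], 7, 8)

def Spec_easer (first : List Int) (second : List Int) (m : Int) (par : String) (lines_to_delete : List Int) (fir : Int) (sec : Int) (out : List Int) : Prop := out = easer_alt first second m par lines_to_delete fir sec
instance (first : List Int) (second : List Int) (m : Int) (par : String) (lines_to_delete : List Int) (fir : Int) (sec : Int) (out : List Int) : Decidable (Spec_easer first second m par lines_to_delete fir sec out) := by unfold Spec_easer; infer_instance

-- ===== CLAIM (what is proved, stated in full; the proofs are below) =====
def Claim_equal_easer : Prop := ∀ (first : List Int) (second : List Int) (m : Int) (par : String) (lines_to_delete : List Int) (fir : Int) (sec : Int), Dom_easer first second m par lines_to_delete fir sec → Pre_easer first second m par lines_to_delete fir sec → Spec_easer first second m par lines_to_delete fir sec (easer first second m par lines_to_delete fir sec)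

-- ===== LEMMAS AND PROOFS =====

-- Characterisation of A's second loop: from a state whose reference components are
-- replicate-lists, the fold appends one 0/1 marker per strict comparison and pops one
-- element per equality.
theorem easer_loop_char (first second : List Int) (L : List Int) (lt0 : List Int) (k k' : Nat) :
    L.foldl
      (fun (st : List Int × List Int × List Int) i =>
        let a := PySem.List.pyGetD first i 0
        let b := PySem.List.pyGetD second i 0
        let lt := if a > b then st.1 ++ [(0 : Int)] else st.1
        let lt := if a < b then lt ++ [(1 : Int)] else lt
        if a = b then (lt, st.2.1.tail, st.2.2.tail) else (lt, st.2.1, st.2.2))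
      (lt0, List.replicate k (0 : Int), List.replicate k' (1 : Int))
    = (lt0 ++ L.flatMap (fun i =>
          if PySem.List.pyGetD first i 0 > PySem.List.pyGetD second i 0 then [(0 : Int)]
          else if PySem.List.pyGetD first i 0 < PySem.List.pyGetD second i 0 then [(1 : Int)]
          else []),
       List.replicate (k - L.countP (fun i => PySem.List.pyGetD first i 0 = PySem.List.pyGetD second i 0)) (0 : Int),
       List.replicate (k' - L.countP (fun i => PySem.List.pyGetD first i 0 = PySem.List.pyGetD second i 0)) (1 : Int)) := by
  induction L generalizing lt0 k k' with
  | nil => simp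
  | cons x L ih =>
    simp only [List.foldl_cons, List.flatMap_cons, List.countP_cons]
    rcases lt_trichotomy (PySem.List.pyGetD first x 0) (PySem.List.pyGetD second x 0) with h | h | h
    · have h1 : ¬ PySem.List.pyGetD first x 0 > PySem.List.pyGetD second x 0 := by omega
      have h2 : PySem.List.pyGetD first x 0 ≠ PySem.List.pyGetD second x 0 := by omega
      simp only [h, h1, h2, if_pos, if_false, decide_eq_true_eq]
      rw [ih]
      simp
    · have h1 : ¬ PySem.List.pyGetD first x 0 > PySem.List.pyGetD second x 0 := by omega
      have h2 : ¬ PySem.List.pyGetD first x 0 < PySem.List.pyGetD second x 0 := by omega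
      simp only [if_pos, h, decide_eq_true_eq]
      rw [List.tail_replicate, List.tail_replicate, ih]
      simp
      omega
    · have h2 : PySem.List.pyGetD first x 0 ≠ PySem.List.pyGetD second x 0 := by omega
      have h3 : ¬ PySem.List.pyGetD first x 0 < PySem.List.pyGetD second x 0 := by omega
      simp only [gt_iff_lt, h, h3, h2, if_pos, if_false, decide_eq_true_eq]
      rw [ih]
      simp

-- the marker list has one entry per strictly-compared index
theorem markers_length (first second : List Int) (L : List Int) :
    (L.flatMap (fun i =>
        if PySem.List.pyGetD first i 0 > PySem.List.pyGetD second i 0 then [(0 : Int)]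
        else if PySem.List.pyGetD first i 0 < PySem.List.pyGetD second i 0 then [(1 : Int)]
        else [])).length
    = L.length - L.countP (fun i => PySem.List.pyGetD first i 0 = PySem.List.pyGetD second i 0) := by
  induction L with
  | nil => simp
  | cons x L ih =>
    have hc : L.countP (fun i => PySem.List.pyGetD first i 0 = PySem.List.pyGetD second i 0) ≤ L.length :=
      List.countP_le_length
    simp only [List.flatMap_cons, List.length_append, List.countP_cons, List.length_cons, ih,
      decide_eq_true_eq]
    split_ifs with h1 h2 h3 <;> simp <;> omega

-- the marker list equals the all-zero reference list iff no index compares strictly below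
theorem markers_eq_replicate_zero (first second : List Int) (L : List Int) :
    (L.flatMap (fun i =>
        if PySem.List.pyGetD first i 0 > PySem.List.pyGetD second i 0 then [(0 : Int)]
        else if PySem.List.pyGetD first i 0 < PySem.List.pyGetD second i 0 then [(1 : Int)]
        else [])
      = List.replicate (L.length - L.countP (fun i => PySem.List.pyGetD first i 0 = PySem.List.pyGetD second i 0)) (0 : Int))
    ↔ (L.all (fun i => PySem.List.pyGetD second i 0 ≤ PySem.List.pyGetD first i 0) = true) := by
  rw [List.eq_replicate_iff]
  simp only [markers_length, List.all_eq_true, decide_eq_true_eq, true_and, List.mem_flatMap]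
  constructor
  · intro h i hi
    by_contra hlt
    push Not at hlt
    have h10 : (1 : Int) = 0 := by
      refine h 1 ⟨i, hi, ?_⟩
      rw [if_neg (by omega), if_pos hlt]
      simp
    omega
  · rintro h b ⟨i, hi, hb⟩
    by_cases hgt : PySem.List.pyGetD first i 0 > PySem.List.pyGetD second i 0
    · rw [if_pos hgt] at hb
      simpa using hb
    · rw [if_neg hgt, if_neg (by have := h i hi; omega)] at hb
      simp at hb

-- symmetric: equals the all-one reference list iff no index compares strictly above
theorem markers_eq_replicate_one (first second : List Int) (L : List Int) :
    (L.flatMap (fun i =>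
        if PySem.List.pyGetD first i 0 > PySem.List.pyGetD second i 0 then [(0 : Int)]
        else if PySem.List.pyGetD first i 0 < PySem.List.pyGetD second i 0 then [(1 : Int)]
        else [])
      = List.replicate (L.length - L.countP (fun i => PySem.List.pyGetD first i 0 = PySem.List.pyGetD second i 0)) (1 : Int))
    ↔ (L.all (fun i => PySem.List.pyGetD first i 0 ≤ PySem.List.pyGetD second i 0) = true) := by
  rw [List.eq_replicate_iff]
  simp only [markers_length, List.all_eq_true, decide_eq_true_eq, true_and, List.mem_flatMap]
  constructor
  · intro h i hi
    by_contra hlt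
    push Not at hlt
    have h01 : (0 : Int) = 1 := by
      refine h 0 ⟨i, hi, ?_⟩
      rw [if_pos (by omega)]
      simp
    omega
  · rintro h b ⟨i, hi, hb⟩
    by_cases hgt : PySem.List.pyGetD first i 0 > PySem.List.pyGetD second i 0
    · exact absurd (h i hi) (by omega)
    · by_cases hlt : PySem.List.pyGetD first i 0 < PySem.List.pyGetD second i 0
      · rw [if_neg hgt, if_pos hlt] at hb
        simpa using hb
      · rw [if_neg hgt, if_neg hlt] at hb
        simp at hb

-- ===== VERDICT (by name: the statement is the Claim_ definition above) =====
set_option maxHeartbeats 1000000 in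
theorem easer_spec : Claim_equal_easer := by
  intro first second m par lines_to_delete fir sec _hdom _hpre
  clear _hdom _hpre
  show _ = _
  unfold easer easer_alt
  have hrep0 : (PySem.List.pyRange 0 m 1).foldl (fun acc _ => acc ++ [(0 : Int)]) []
      = List.replicate (PySem.List.pyRange 0 m 1).length (0 : Int) := by
    rw [PySem.List.foldl_append_singleton_eq_map]
    simp
  have hrep1 : (PySem.List.pyRange 0 m 1).foldl (fun acc _ => acc ++ [(1 : Int)]) []
      = List.replicate (PySem.List.pyRange 0 m 1).length (1 : Int) := by
    rw [PySem.List.foldl_append_singleton_eq_map]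
    simp
  simp only [hrep0, hrep1]
  rw [easer_loop_char]
  simp only [List.nil_append]
  simp only [markers_eq_replicate_zero first second (PySem.List.pyRange 0 m 1),
      markers_eq_replicate_one first second (PySem.List.pyRange 0 m 1)]
  by_cases hg : ((PySem.List.pyRange 0 m 1).all
      (fun i => PySem.List.pyGetD second i 0 ≤ PySem.List.pyGetD first i 0) = true) <;>
  by_cases hl : ((PySem.List.pyRange 0 m 1).all
      (fun i => PySem.List.pyGetD first i 0 ≤ PySem.List.pyGetD second i 0) = true) <;>
  by_cases hmax : par = "max" <;> by_cases hmin : par = "min" <;>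
  simp [hg, hl, hmax, hmin]
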